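-- pv_equiv track=rewrite | github.com/thinkwelltwd/device_detector | device_detector/parser/client_hints.py | extract_name_from_hints
-- ===== SOURCE A (Python) =====
-- CHROMIUM_BASED_BROWSERS = frozenset((
--     'Chromium',
--     'Chrome Webview',
--     'Microsoft Edge',
--     'Microsoft Edge Simulate',
-- ))
--
-- def extract_name_from_hints(hints: dict) -> str:
--     """
--     Extract most specific name from client hints.
--     """
--
--     for client_name in hints:
--         # If we detected a brand, that is not Chromium, we will use it,
--         # otherwise we will look further
--         if client_name not in CHROMIUM_BASED_BROWSERS:
--             return client_name
--
--     name = ''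
--     for client_name in hints:
--         name = client_name
--         if client_name != 'Chromium':
--             break
--
--     return name
-- ===== SOURCE B (Python) =====
-- CHROMIUM_BASED_BROWSERS = frozenset((
--     'Chromium',
--     'Chrome Webview',
--     'Microsoft Edge',
--     'Microsoft Edge Simulate',
-- ))
--
-- def extract_name_from_hints(hints: dict) -> str:
--     """
--     Extract most specific name from client hints (single pass).
--     """
--     fallback = ''
--     locked = False
--     for client_name in hints:
--         if client_name not in CHROMIUM_BASED_BROWSERS:
--             return client_name
--         if not locked:
--             fallback = client_name
--             locked = client_name != 'Chromium'
--     return fallback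
-- ===== Notes on version B (the rewrite author's own statement) =====
-- stated objective: simpler
-- what changed: Replaces A's two successive scans (find-first-non-chromium, then find-first-non-'Chromium') by one single pass that keeps a fallback name and a locked flag.
import Mathlib
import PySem

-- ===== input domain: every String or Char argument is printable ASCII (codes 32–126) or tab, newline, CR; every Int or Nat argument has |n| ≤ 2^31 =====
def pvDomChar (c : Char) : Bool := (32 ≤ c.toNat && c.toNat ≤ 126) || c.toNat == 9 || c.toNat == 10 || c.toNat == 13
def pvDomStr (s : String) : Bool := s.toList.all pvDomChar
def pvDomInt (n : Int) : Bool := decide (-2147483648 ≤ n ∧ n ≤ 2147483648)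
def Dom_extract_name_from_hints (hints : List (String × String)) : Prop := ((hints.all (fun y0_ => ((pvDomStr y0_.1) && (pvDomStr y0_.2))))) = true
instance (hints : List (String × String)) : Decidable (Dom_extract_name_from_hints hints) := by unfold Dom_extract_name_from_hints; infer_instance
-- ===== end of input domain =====

-- B: one single pass with a fallback name and a locked flag, instead of A's two scans (simpler).
-- ===== PORT A =====
def chromiumBasedBrowsers : List String :=
  ["Chromium", "Chrome Webview", "Microsoft Edge", "Microsoft Edge Simulate"]

-- first `for` loop of A: return the first key not in CHROMIUM_BASED_BROWSERS
def loopA1 : List String → Option String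
  | [] => none
  | k :: ks => if k ∈ chromiumBasedBrowsers then loopA1 ks else some k

-- second `for` loop of A: name = k; break when k != 'Chromium'
def loopA2 (name : String) : List String → String
  | [] => name
  | k :: ks => if k ≠ "Chromium" then k else loopA2 k ks

def extract_name_from_hints (hints : List (String × String)) : String :=
  let ks := hints.map Prod.fst
  match loopA1 ks with
  | some k => k
  | none => loopA2 "" ks

-- ===== PORT B =====
def loopB (fallback : String) (locked : Bool) : List String → String
  | [] => fallback
  | k :: ks =>
    if k ∈ chromiumBasedBrowsers then
      if locked then loopB fallback locked ks
      else loopB k (k ≠ "Chromium") ks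
    else k

def extract_name_from_hints_alt (hints : List (String × String)) : String :=
  loopB "" false (hints.map Prod.fst)

-- ===== PRECONDITION & SPEC =====
def Spec_extract_name_from_hints (hints : List (String × String)) (out : String) : Prop := out = extract_name_from_hints_alt hints
instance (hints : List (String × String)) (out : String) : Decidable (Spec_extract_name_from_hints hints out) := by unfold Spec_extract_name_from_hints; infer_instance

-- ===== CLAIM (what is proved, stated in full; the proofs are below) =====
def Claim_equal_extract_name_from_hints : Prop := ∀ (hints : List (String × String)), Dom_extract_name_from_hints hints → Spec_extract_name_from_hints hints (extract_name_from_hints hints)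

-- ===== LEMMAS AND PROOFS =====
theorem loopA1_cons (a : String) (as : List String) :
    loopA1 (a :: as) = if a ∈ chromiumBasedBrowsers then loopA1 as else some a := rfl

theorem loopB_cons (f : String) (l : Bool) (a : String) (as : List String) :
    loopB f l (a :: as) =
      if a ∈ chromiumBasedBrowsers then
        (if l then loopB f l as else loopB a (a ≠ "Chromium") as) else a := rfl

theorem loopB_of_loopA1_some (ks : List String) (k : String) (h : loopA1 ks = some k)
    (f : String) (l : Bool) : loopB f l ks = k := by
  induction ks generalizing f l with
  | nil => simp [loopA1] at h
  | cons a as ih =>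
    rw [loopA1_cons] at h
    rw [loopB_cons]
    split at h
    next ha =>
      rw [if_pos ha]
      split <;> exact ih h _ _
    next ha =>
      rw [if_neg ha]
      exact Option.some.inj h

theorem loopB_locked (ks : List String) (h : loopA1 ks = none) (f : String) :
    loopB f true ks = f := by
  induction ks generalizing f with
  | nil => rfl
  | cons a as ih =>
    rw [loopA1_cons] at h
    split at h
    next ha => rw [loopB_cons, if_pos ha]; exact ih h f
    next => exact absurd h (by simp)

theorem loopB_eq_loopA2 (ks : List String) (h : loopA1 ks = none) (f : String) :
    loopB f false ks = loopA2 f ks := by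
  induction ks generalizing f with
  | nil => rfl
  | cons a as ih =>
    rw [loopA1_cons] at h
    split at h
    next ha =>
      rw [loopB_cons, if_pos ha]
      by_cases hc : a = "Chromium"
      · simp only [loopA2, hc]
        simp only [if_false, ne_eq, not_true_eq_false, decide_false, Bool.false_eq_true]
        exact ih h "Chromium"
      · simp only [loopA2, hc, ne_eq, not_false_eq_true, decide_true, if_true, if_false,
          Bool.false_eq_true]
        exact loopB_locked as h a
    next => exact absurd h (by simp)

-- ===== VERDICT (by name: the statement is the Claim_ definition above) =====
theorem extract_name_from_hints_spec : Claim_equal_extract_name_from_hints := by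
  intro hints _
  unfold Spec_extract_name_from_hints extract_name_from_hints extract_name_from_hints_alt
  dsimp only
  cases h : loopA1 (hints.map Prod.fst) with
  | none => exact (loopB_eq_loopA2 _ h "").symm
  | some k => exact (loopB_of_loopA1_some _ _ h _ _).symm
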